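-- pv_equiv track=rewrite | github.com/konszymanski/leetcode-dataset | obfuscated_solutions/python/0564-find-the-closest-palindrome/solution_1_l0_l1_l2.py | v6_350
-- ===== SOURCE A (Python) =====
-- def v6_350(v11_792: int, v12_858: bool) -> int:
--     v8_242 = v11_792
--     if not v12_858:
--         v11_792 = v11_792 // 10
--     while v11_792 > 0:
--         v8_242 = v8_242 * 10 + v11_792 % 10
--         v11_792 = v11_792 // 10
--     return v8_242
-- ===== SOURCE B (Python) =====
-- def v6_350(v11_792: int, v12_858: bool) -> int:
--     if v11_792 <= 0:
--         return v11_792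
--     m = v11_792 if v12_858 else v11_792 // 10
--     p = 1
--     while p <= m:
--         p *= 10
--     rev, q = 0, 1
--     while q < p:
--         rev += m // q % 10 * (p // (10 * q))
--         q *= 10
--     return v11_792 * p + rev
-- ===== Notes on version B (the rewrite author's own statement) =====
-- stated objective: alternative
-- what changed: A strips digits off a shrinking copy of n and appends each to an accumulator by repeatedly rescaling it (acc = acc*10 + digit); B never mutates m or rescales an accumulator: it first computes p = 10^(digit count of m) with a pure multiplication loop, then reads digit i non-destructively as m // 10^i % 10 and adds it at its mirrored position with weight p // (10*10^i), returning n*p + rev in one closed combination.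
import Mathlib
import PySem

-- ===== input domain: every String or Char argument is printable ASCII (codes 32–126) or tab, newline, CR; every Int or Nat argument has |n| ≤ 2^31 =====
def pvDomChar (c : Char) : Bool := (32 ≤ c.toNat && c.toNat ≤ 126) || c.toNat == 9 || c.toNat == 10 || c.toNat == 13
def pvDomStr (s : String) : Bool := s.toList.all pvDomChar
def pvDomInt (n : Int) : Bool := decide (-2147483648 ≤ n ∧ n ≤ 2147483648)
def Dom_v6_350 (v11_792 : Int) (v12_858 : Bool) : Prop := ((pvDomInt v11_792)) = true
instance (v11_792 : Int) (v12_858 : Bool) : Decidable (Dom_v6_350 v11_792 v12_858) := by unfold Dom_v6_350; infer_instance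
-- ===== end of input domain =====

-- B replaces A's destructive digit-stripping loop (acc = acc*10 + digit, m //= 10) with a
-- power-index scheme: it computes p = 10^(digit count) once, then reads each digit of m
-- non-destructively as m // 10^i % 10 and places it at its mirrored weight p // (10*10^i);
-- objective: alternative algorithm of the same cost.


-- ===== PORT A =====
-- while v11_792 > 0: v8_242 = v8_242 * 10 + v11_792 % 10; v11_792 = v11_792 // 10
def v6_350Loop (v8_242 : Int) (v11_792 : Int) : Int :=
  if h : v11_792 > 0 then
    v6_350Loop (v8_242 * 10 + PySem.Int.mod v11_792 10) (PySem.Int.floordiv v11_792 10)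
  else v8_242
termination_by v11_792.toNat
decreasing_by
  have h10 : (0:Int) < 10 := by omega
  rw [PySem.Int.floordiv_eq_ediv_of_pos h10]
  have h1 : v11_792 / 10 < v11_792 := by omega
  have h2 : (0:Int) ≤ v11_792 / 10 := by omega
  omega

def v6_350 (v11_792 : Int) (v12_858 : Bool) : Int :=
  let v8_242 := v11_792
  let v11 := if v12_858 then v11_792 else PySem.Int.floordiv v11_792 10
  v6_350Loop v8_242 v11

-- ===== PORT B =====
-- while p <= m: p *= 10   (the '0 < p' conjunct is a totality guard only: every call has p ≥ 1)
def bPowLoop (m p : Int) : Int :=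
  if h : p ≤ m ∧ 0 < p then bPowLoop m (p * 10) else p
termination_by (m + 1 - p).toNat
decreasing_by omega

-- while q < p: rev += m // q % 10 * (p // (10 * q)); q *= 10
-- (the '0 < q' conjunct is a totality guard only: every call has q ≥ 1)
def bRevLoop (m p rev q : Int) : Int :=
  if h : q < p ∧ 0 < q then
    bRevLoop m p
      (rev + PySem.Int.mod (PySem.Int.floordiv m q) 10 * PySem.Int.floordiv p (10 * q))
      (q * 10)
  else rev
termination_by (p - q).toNat
decreasing_by omega

def v6_350_alt (v11_792 : Int) (v12_858 : Bool) : Int :=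
  if v11_792 ≤ 0 then v11_792
  else
    let m := if v12_858 then v11_792 else PySem.Int.floordiv v11_792 10
    let p := bPowLoop m 1
    v11_792 * p + bRevLoop m p 0 1

-- ===== PRECONDITION & SPEC =====
def Spec_v6_350 (v11_792 : Int) (v12_858 : Bool) (out : Int) : Prop := out = v6_350_alt v11_792 v12_858
instance (v11_792 : Int) (v12_858 : Bool) (out : Int) : Decidable (Spec_v6_350 v11_792 v12_858 out) := by unfold Spec_v6_350; infer_instance

-- ===== CLAIM (what is proved, stated in full; the proofs are below) =====
def Claim_equal_v6_350 : Prop := ∀ (v11_792 : Int) (v12_858 : Bool), Dom_v6_350 v11_792 v12_858 → Spec_v6_350 v11_792 v12_858 (v6_350 v11_792 v12_858)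

-- ===== LEMMAS AND PROOFS =====
-- Proof-side specification: revpow m = (digit reversal of m, 10 ^ digit count of m).
def revpow (m : Int) : Int × Int :=
  if h : m ≤ 0 then (0, 1)
  else
    let rp := revpow (m / 10)
    (m % 10 * rp.2 + rp.1, 10 * rp.2)
termination_by m.toNat
decreasing_by
  have h1 : m / 10 < m := by omega
  have h2 : (0:Int) ≤ m / 10 := by omega
  omega

theorem revpow_pw_pos (m : Int) : 0 < (revpow m).2 := by
  induction m using revpow.induct with
  | case1 m h => rw [revpow]; simp [h]
  | case2 m h ih => rw [revpow]; simp only [h, dif_neg, not_false_iff]; omega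

theorem revpow_nonpos {x : Int} (hx : x ≤ 0) : revpow x = (0, 1) := by
  rw [revpow]; simp [hx]

theorem revpow_pos_snd {x : Int} (hx : 0 < x) : (revpow x).2 = 10 * (revpow (x / 10)).2 := by
  conv_lhs => rw [revpow]
  simp [show ¬ x ≤ 0 by omega]

theorem revpow_pos_fst {x : Int} (hx : 0 < x) :
    (revpow x).1 = x % 10 * (revpow (x / 10)).2 + (revpow (x / 10)).1 := by
  conv_lhs => rw [revpow]
  simp [show ¬ x ≤ 0 by omega]

-- A's loop computes acc * pw + rev of the remaining number.
theorem v6_350Loop_eq_revpow (k : Nat) :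
    ∀ (m acc : Int), m.toNat ≤ k → v6_350Loop acc m = acc * (revpow m).2 + (revpow m).1 := by
  induction k with
  | zero =>
    intro m acc hm
    have hm0 : m ≤ 0 := by omega
    rw [v6_350Loop, revpow]
    simp [show ¬ m > 0 by omega, hm0]
  | succ k ih =>
    intro m acc hm
    by_cases h : m > 0
    · have h10 : (0:Int) < 10 := by omega
      have hfd : PySem.Int.floordiv m 10 = m / 10 := PySem.Int.floordiv_eq_ediv_of_pos h10
      have hmd : PySem.Int.mod m 10 = m % 10 := PySem.Int.mod_eq_emod_of_pos h10
      rw [v6_350Loop, dif_pos h,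
        ih (PySem.Int.floordiv m 10) _ (by rw [hfd]; omega), hfd, hmd,
        revpow_pos_snd h, revpow_pos_fst h]
      ring
    · rw [v6_350Loop, dif_neg h, revpow_nonpos (by omega)]
      ring

-- B's power loop: starting from p > 0, it returns p * 10^(digit count of m // p).
theorem bPowLoop_eq (k : Nat) :
    ∀ (x m p : Int), 0 ≤ m → 0 < p → m / p = x → x.toNat ≤ k →
      bPowLoop m p = p * (revpow x).2 := by
  induction k with
  | zero =>
    intro x m p hm hp hx hk
    have hx0 : x = 0 := by
      have : 0 ≤ x := hx ▸ Int.ediv_nonneg hm (le_of_lt hp)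
      omega
    have hlt : m < p := by
      by_contra hge
      have h1 : (1:Int) ≤ m / p := by
        rw [Int.le_ediv_iff_mul_le hp]; omega
      omega
    rw [bPowLoop, dif_neg (by omega : ¬ (p ≤ m ∧ 0 < p)), hx0, revpow_nonpos le_rfl]
    ring
  | succ k ih =>
    intro x m p hm hp hx hk
    by_cases hxp : 0 < x
    · have hpm : p ≤ m := by
        by_contra hge
        have : m / p = 0 := Int.ediv_eq_zero_of_lt hm (by omega)
        omega
      have hdd : m / (p * 10) = x / 10 := by
        rw [← hx, ← Int.ediv_ediv_of_nonneg (le_of_lt hp)]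
      rw [bPowLoop, dif_pos ⟨hpm, hp⟩,
        ih (x / 10) m (p * 10) hm (by omega) hdd (by omega),
        revpow_pos_snd hxp]
      ring
    · have hx0 : x = 0 := by
        have : 0 ≤ x := hx ▸ Int.ediv_nonneg hm (le_of_lt hp)
        omega
      have hlt : m < p := by
        by_contra hge
        have h1 : (1:Int) ≤ m / p := by
          rw [Int.le_ediv_iff_mul_le hp]; omega
        omega
      rw [bPowLoop, dif_neg (by omega : ¬ (p ≤ m ∧ 0 < p)), hx0, revpow_nonpos le_rfl]
      ring

-- B's placement loop accumulates exactly the digit reversal of m // q.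
theorem bRevLoop_eq (k : Nat) :
    ∀ (x m q rev : Int), 0 ≤ m → 0 < q → m / q = x → x.toNat ≤ k →
      bRevLoop m (q * (revpow x).2) rev q = rev + (revpow x).1 := by
  induction k with
  | zero =>
    intro x m q rev hm hq hx hk
    have hx0 : x = 0 := by
      have : 0 ≤ x := hx ▸ Int.ediv_nonneg hm (le_of_lt hq)
      omega
    rw [hx0, revpow_nonpos le_rfl, bRevLoop]
    simp
  | succ k ih =>
    intro x m q rev hm hq hx hk
    by_cases hxp : 0 < x
    · have hpw10 : (revpow x).2 = 10 * (revpow (x / 10)).2 := revpow_pos_snd hxp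
      have hpwpos : 0 < (revpow (x / 10)).2 := revpow_pw_pos _
      have hguard : q < q * (revpow x).2 ∧ 0 < q := by
        refine ⟨?_, hq⟩
        rw [hpw10]; nlinarith
      have hdd : m / (q * 10) = x / 10 := by
        rw [← hx, ← Int.ediv_ediv_of_nonneg (le_of_lt hq)]
      have hfd : PySem.Int.floordiv m q = m / q := PySem.Int.floordiv_eq_ediv_of_pos hq
      have hmd : PySem.Int.mod (PySem.Int.floordiv m q) 10 = x % 10 := by
        rw [hfd, hx]; exact PySem.Int.mod_eq_emod_of_pos (by omega)
      have hw : PySem.Int.floordiv (q * (revpow x).2) (10 * q) = (revpow (x / 10)).2 := by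
        rw [PySem.Int.floordiv_eq_ediv_of_pos (by omega : (0:Int) < 10 * q), hpw10,
          show q * (10 * (revpow (x / 10)).2) = (revpow (x / 10)).2 * (10 * q) by ring]
        exact Int.mul_ediv_cancel _ (by omega)
      rw [bRevLoop, dif_pos hguard, hmd, hw,
        show q * (revpow x).2 = q * 10 * (revpow (x / 10)).2 by rw [hpw10]; ring,
        ih (x / 10) m (q * 10) _ hm (by omega) hdd (by omega),
        revpow_pos_fst hxp]
      ring
    · have hx0 : x = 0 := by
        have : 0 ≤ x := hx ▸ Int.ediv_nonneg hm (le_of_lt hq)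
        omega
      rw [hx0, revpow_nonpos le_rfl, bRevLoop]
      simp

-- ===== VERDICT (by name: the statement is the Claim_ definition above) =====
theorem v6_350_spec : Claim_equal_v6_350 := by
  intro n flag _
  unfold Spec_v6_350 v6_350 v6_350_alt
  by_cases hn : n ≤ 0
  · -- A's loop never runs: with the flag the argument is n ≤ 0; without it, n // 10 ≤ 0
    have hfd : PySem.Int.floordiv n 10 = n / 10 :=
      PySem.Int.floordiv_eq_ediv_of_pos (by omega : (0:Int) < 10)
    simp only [hn, if_pos]
    cases flag
    · rw [v6_350Loop, dif_neg (by rw [hfd]; omega)]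
    · rw [v6_350Loop, dif_neg (by omega)]
  · simp only [hn, if_false]
    have hfd : PySem.Int.floordiv n 10 = n / 10 :=
      PySem.Int.floordiv_eq_ediv_of_pos (by omega : (0:Int) < 10)
    set m := if flag then n else PySem.Int.floordiv n 10 with hmdef
    have hm : 0 ≤ m := by
      rw [hmdef]; cases flag
      · rw [hfd]; omega
      · simp; omega
    have hp : bPowLoop m 1 = (revpow m).2 := by
      have := bPowLoop_eq m.toNat m m 1 hm (by omega) (by omega) (le_refl _)
      simpa using this
    have hr : bRevLoop m ((revpow m).2) 0 1 = (revpow m).1 := by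
      have := bRevLoop_eq m.toNat m m 1 0 hm (by omega) (by omega) (le_refl _)
      simpa using this
    rw [hp, hr, v6_350Loop_eq_revpow m.toNat m n (le_refl _)]
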